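-- pv_equiv track=rewrite | github.com/ajrichter/aoc | day2.py | checkDecrease
-- ===== SOURCE A (Python) =====
-- def checkDecrease(downList):
--     if(len(downList) == 1):
--         return True
--     a = int(downList[0])
--     b = int(downList[1])
--     if ((a > b) and (a-3 <= b)):
--         return checkDecrease(downList[1:])
--     else:
--         return False
-- ===== SOURCE B (Python) =====
-- def checkDecrease(downList):
--     return all(a > b and a - 3 <= b for a, b in zip(downList, downList[1:]))
-- ===== Notes on version B (the rewrite author's own statement) =====
-- stated objective: simpler
-- what changed: Replaced the recursion that re-slices the list at every step (downList[1:]) with a single all() pass over adjacent pairs via zip.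
import Mathlib
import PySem

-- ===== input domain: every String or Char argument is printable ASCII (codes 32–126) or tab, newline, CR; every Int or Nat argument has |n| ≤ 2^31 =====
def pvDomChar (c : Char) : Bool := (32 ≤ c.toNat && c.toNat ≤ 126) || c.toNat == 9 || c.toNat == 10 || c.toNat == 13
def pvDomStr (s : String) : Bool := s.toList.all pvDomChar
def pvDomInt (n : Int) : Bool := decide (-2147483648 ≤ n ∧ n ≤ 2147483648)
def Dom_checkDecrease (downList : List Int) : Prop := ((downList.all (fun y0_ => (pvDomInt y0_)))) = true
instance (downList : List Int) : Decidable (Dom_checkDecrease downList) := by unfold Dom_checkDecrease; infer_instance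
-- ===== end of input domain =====

-- B replaces A's recursion-with-slicing by one linear pass over adjacent pairs (simpler).
-- ===== PORT A =====
-- A raises IndexError on []; the port's [] branch is never reached inside Pre_.
def checkDecrease (downList : List Int) : Bool :=
  match downList with
  | [] => false
  | [_] => true
  | a :: b :: rest =>
    if a > b ∧ a - 3 ≤ b then checkDecrease (b :: rest) else false

-- ===== PORT B =====
def checkDecrease_alt (downList : List Int) : Bool :=
  (downList.zip downList.tail).all (fun p => p.1 > p.2 && p.1 - 3 ≤ p.2)

-- ===== PRECONDITION & SPEC =====
-- Pre_ excludes only the empty list, on which A raises IndexError.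
def Pre_checkDecrease (downList : List Int) : Prop := downList ≠ []
instance (downList : List Int) : Decidable (Pre_checkDecrease downList) := by unfold Pre_checkDecrease; infer_instance
def pvWitness_checkDecrease : List Int := [5, 3, 1]
def Spec_checkDecrease (downList : List Int) (out : Bool) : Prop := out = checkDecrease_alt downList
instance (downList : List Int) (out : Bool) : Decidable (Spec_checkDecrease downList out) := by unfold Spec_checkDecrease; infer_instance

-- ===== CLAIM (what is proved, stated in full; the proofs are below) =====
def Claim_equal_checkDecrease : Prop := ∀ (downList : List Int), Dom_checkDecrease downList → Pre_checkDecrease downList → Spec_checkDecrease downList (checkDecrease downList)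

-- ===== LEMMAS AND PROOFS =====

-- ===== VERDICT (by name: the statement is the Claim_ definition above) =====
lemma eq_nonempty (a : Int) (rest : List Int) :
    checkDecrease (a :: rest) = checkDecrease_alt (a :: rest) := by
  induction rest generalizing a with
  | nil => simp [checkDecrease, checkDecrease_alt]
  | cons b rest ih =>
    simp only [checkDecrease, checkDecrease_alt, List.tail_cons, List.zip_cons_cons,
      List.all_cons]
    rw [show ((b :: rest).zip rest).all (fun p => p.1 > p.2 && p.1 - 3 ≤ p.2)
        = checkDecrease_alt (b :: rest) from rfl, ← ih b]
    by_cases h : a > b ∧ a - 3 ≤ b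
    · simp [h]
    · rw [if_neg h]
      rcases not_and_or.mp h with h1 | h1 <;> simp [h1]

theorem checkDecrease_spec : Claim_equal_checkDecrease := by
  intro xs _ hpre
  unfold Spec_checkDecrease
  match xs with
  | [] => exact absurd rfl hpre
  | a :: rest => exact eq_nonempty a rest
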